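-- pv_equiv track=rewrite | github.com/jds8/SAE4DLM-CE | dlm_order/dream_infer.py | apply_early_stop_from_history
-- ===== SOURCE A (Python) =====
-- from typing import Any, Dict, List, Optional, Tuple
--
-- def find_first_stop(gen_ids: List[int], stop_seqs: List[List[int]]) -> Optional[Tuple[int, int]]:
--     """
--     Return (index, length) of earliest stop sequence match in gen_ids.
--     """
--     best: Optional[Tuple[int, int]] = None
--     n = len(gen_ids)
--     for i in range(n):
--         for seq in stop_seqs:
--             m = len(seq)
--             if m == 0 or i + m > n:
--                 continue
--             if gen_ids[i: i + m] == seq: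
--                 if best is None or i < best[0]:
--                     best = (i, m)
--         if best is not None and best[0] == i:
--             return best
--     return best
--
-- def apply_early_stop_from_history(
--     step_seqs: List[List[int]],
--     input_len: int,
--     stop_seqs: List[List[int]],
--     max_new_tokens: int,
-- ) -> Tuple[List[List[int]], int]:
--     """
--     Use history to simulate "stop when stop token appears":
--       - Find the earliest step where a stop sequence appears in the generated region.
--       - Return truncated step_seqs (up to that step) and gen_end_abs (exclusive, stop token removed).
--     If no stop token ever appears, keep all steps and gen_end_abs = input_len + max_new_tokens (bounded by sequence length).
--     """
--     if len(step_seqs) == 0: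
--         return step_seqs, input_len
--
--     best_step: Optional[int] = None
--     best_cut_abs: Optional[int] = None
--
--     for t, ids in enumerate(step_seqs):
--         gen_ids = ids[input_len:]
--         hit = find_first_stop(gen_ids, stop_seqs)
--         if hit is None:
--             continue
--         idx, _m = hit
--         cut_abs = input_len + idx
--         best_step = t
--         best_cut_abs = cut_abs
--         break
--
--     if best_step is None:
--         last_len = len(step_seqs[-1])
--         gen_end_abs = min(last_len, input_len + int(max_new_tokens))
--         return step_seqs, gen_end_abs
--
--     truncated_steps = step_seqs[: best_step + 1]
--     return truncated_steps, int(best_cut_abs)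
-- ===== SOURCE B (Python) =====
-- from typing import List, Optional, Tuple
--
-- def _first_occurrence(hay: List[int], pat: List[int]) -> Optional[int]:
--     """Index of first occurrence of non-empty pat in hay, else None."""
--     m = len(pat)
--     if m == 0:
--         return None
--     for i in range(len(hay) - m + 1):
--         if hay[i:i + m] == pat:
--             return i
--     return None
--
-- def apply_early_stop_from_history(
--     step_seqs: List[List[int]],
--     input_len: int,
--     stop_seqs: List[List[int]],
--     max_new_tokens: int,
-- ) -> Tuple[List[List[int]], int]:
--     if not step_seqs:
--         return step_seqs, input_len
--     for t, ids in enumerate(step_seqs):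
--         gen = ids[input_len:]
--         hits = [j for j in (_first_occurrence(gen, pat) for pat in stop_seqs) if j is not None]
--         if hits:
--             return step_seqs[: t + 1], input_len + min(hits)
--     gen_end_abs = min(len(step_seqs[-1]), input_len + int(max_new_tokens))
--     return step_seqs, gen_end_abs
-- ===== Notes on version B (the rewrite author's own statement) =====
-- stated objective: alternative
-- what changed: A scans positions left-to-right, maintaining a best-(index,length) state over an inner per-pattern loop with an early return; B instead computes the first occurrence of each stop pattern independently and takes the minimum of those indices, with no shared best state or early-return bookkeeping.
import Mathlib
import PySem

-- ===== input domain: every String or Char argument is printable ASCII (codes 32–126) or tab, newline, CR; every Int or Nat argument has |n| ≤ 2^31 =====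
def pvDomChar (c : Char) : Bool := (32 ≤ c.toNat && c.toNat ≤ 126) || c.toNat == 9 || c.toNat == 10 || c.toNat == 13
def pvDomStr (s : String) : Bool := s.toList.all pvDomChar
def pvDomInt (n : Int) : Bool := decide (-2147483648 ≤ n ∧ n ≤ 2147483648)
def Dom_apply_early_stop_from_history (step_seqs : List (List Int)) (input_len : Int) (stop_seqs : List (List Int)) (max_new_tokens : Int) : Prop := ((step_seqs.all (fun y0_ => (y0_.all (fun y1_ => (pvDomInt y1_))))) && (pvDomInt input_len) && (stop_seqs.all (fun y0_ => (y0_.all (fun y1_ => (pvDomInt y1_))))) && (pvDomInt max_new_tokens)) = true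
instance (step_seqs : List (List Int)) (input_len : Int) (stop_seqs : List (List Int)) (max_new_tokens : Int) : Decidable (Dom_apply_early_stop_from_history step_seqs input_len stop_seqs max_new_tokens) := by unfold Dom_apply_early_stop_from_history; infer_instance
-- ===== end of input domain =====

-- B replaces A's position-major scan with best-state and early return (find_first_stop) by a
-- pattern-major scan: first occurrence of each stop pattern, then the minimum. Objective: alternative (same cost, no shared best-state).

-- ===== PORT A =====
-- inner `for seq in stop_seqs` loop of find_first_stop, carrying `best`
def ffsInner (gen : List Int) (n : Nat) (i : Nat) : List (List Int) → Option (Int × Int) → Option (Int × Int)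
  | [], best => best
  | seq :: rest, best =>
    if seq.length = 0 ∨ n < i + seq.length then ffsInner gen n i rest best
    else if PySem.List.slice gen (some (i : Int)) (some ((i : Int) + (seq.length : Int))) = seq then
      -- `best is None or i < best[0]`: Option.all is true on none, tests the predicate on some
      if best.all (fun b => decide ((i : Int) < b.1)) then
        ffsInner gen n i rest (some ((i : Int), (seq.length : Int)))
      else ffsInner gen n i rest best
    else ffsInner gen n i rest best

-- outer `for i in range(n)` loop with the early `return best`
def ffsLoop (gen : List Int) (ss : List (List Int)) (n : Nat) (i : Nat) (best : Option (Int × Int)) : Option (Int × Int) :=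
  if _h : i < n then
    match ffsInner gen n i ss best with
    | some b => if b.1 = (i : Int) then some b else ffsLoop gen ss n (i + 1) (some b)
    | none => ffsLoop gen ss n (i + 1) none
  else best
termination_by n - i

def find_first_stop (gen_ids : List Int) (stop_seqs : List (List Int)) : Option (Int × Int) :=
  ffsLoop gen_ids stop_seqs gen_ids.length 0 none

-- `for t, ids in enumerate(step_seqs)` with break at the first hit; returns (best_step, best_cut_abs)
def aScan (input_len : Int) (stop_seqs : List (List Int)) : Nat → List (List Int) → Option (Nat × Int)
  | _, [] => none
  | t, ids :: rest =>
    let gen_ids := PySem.List.slice ids (some input_len) none   -- ids[input_len:]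
    match find_first_stop gen_ids stop_seqs with
    | none => aScan input_len stop_seqs (t + 1) rest
    | some hit => some (t, input_len + hit.1)

def apply_early_stop_from_history (step_seqs : List (List Int)) (input_len : Int) (stop_seqs : List (List Int)) (max_new_tokens : Int) : List (List Int) × Int :=
  if step_seqs.length = 0 then (step_seqs, input_len)
  else
    match aScan input_len stop_seqs 0 step_seqs with
    | none =>
      -- step_seqs[-1] is total here (nonempty branch), ported as getLastD
      let last_len := (step_seqs.getLastD []).length
      (step_seqs, min (last_len : Int) (input_len + max_new_tokens))
    | some bc =>
      (PySem.List.slice step_seqs none (some ((bc.1 : Int) + 1)), bc.2)   -- step_seqs[:best_step+1]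

-- ===== PORT B =====
-- first occurrence of non-empty pat in hay (Source B _first_occurrence); drop/take = hay[i:i+m] (i, m ≥ 0, exact)
def firstOccAux (hay pat : List Int) (i : Nat) : Option Int :=
  if _h : i + pat.length ≤ hay.length then
    if (hay.drop i).take pat.length = pat then some (i : Int)
    else firstOccAux hay pat (i + 1)
  else none
termination_by hay.length + 1 - i

def firstOcc (hay pat : List Int) : Option Int :=
  if pat.length = 0 then none else firstOccAux hay pat 0

-- Source B's step loop: per step, min of the per-pattern first occurrences
def bScan (input_len : Int) (stop_seqs : List (List Int)) : Nat → List (List Int) → Option (Nat × Int)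
  | _, [] => none
  | t, ids :: rest =>
    let gen := PySem.List.slice ids (some input_len) none   -- ids[input_len:]
    match PySem.List.min? (stop_seqs.filterMap (fun pat => firstOcc gen pat)) (fun x => x) with
    | some v => some (t, input_len + v)
    | none => bScan input_len stop_seqs (t + 1) rest

def apply_early_stop_from_history_alt (step_seqs : List (List Int)) (input_len : Int) (stop_seqs : List (List Int)) (max_new_tokens : Int) : List (List Int) × Int :=
  match step_seqs with
  | [] => (step_seqs, input_len)
  | _ :: _ =>
    match bScan input_len stop_seqs 0 step_seqs with
    | some tc => (step_seqs.take (tc.1 + 1), tc.2)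
    | none => (step_seqs, min (((step_seqs.getLastD []).length : Int)) (input_len + max_new_tokens))

-- ===== PRECONDITION & SPEC =====
def Spec_apply_early_stop_from_history (step_seqs : List (List Int)) (input_len : Int) (stop_seqs : List (List Int)) (max_new_tokens : Int) (out : List (List Int) × Int) : Prop := out = apply_early_stop_from_history_alt step_seqs input_len stop_seqs max_new_tokens
instance (step_seqs : List (List Int)) (input_len : Int) (stop_seqs : List (List Int)) (max_new_tokens : Int) (out : List (List Int) × Int) : Decidable (Spec_apply_early_stop_from_history step_seqs input_len stop_seqs max_new_tokens out) := by unfold Spec_apply_early_stop_from_history; infer_instance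

-- ===== CLAIM (what is proved, stated in full; the proofs are below) =====
def Claim_equal_apply_early_stop_from_history : Prop := ∀ (step_seqs : List (List Int)) (input_len : Int) (stop_seqs : List (List Int)) (max_new_tokens : Int), Dom_apply_early_stop_from_history step_seqs input_len stop_seqs max_new_tokens → Spec_apply_early_stop_from_history step_seqs input_len stop_seqs max_new_tokens (apply_early_stop_from_history step_seqs input_len stop_seqs max_new_tokens)

-- ===== LEMMAS AND PROOFS =====
-- "pattern pat matches gen at position j"
def pvMatch (gen pat : List Int) (j : Nat) : Prop := (gen.drop j).take pat.length = pat
-- "some non-empty stop pattern matches gen at position j"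
def pvHit (gen : List Int) (ss : List (List Int)) (j : Nat) : Prop :=
  ∃ pat ∈ ss, pat.length ≠ 0 ∧ pvMatch gen pat j

theorem pvHit_cons {gen pat : List Int} {rest : List (List Int)} {j : Nat} :
    pvHit gen (pat :: rest) j ↔ (pat.length ≠ 0 ∧ pvMatch gen pat j) ∨ pvHit gen rest j := by
  unfold pvHit
  exact List.exists_mem_cons_iff _ _ _

theorem pvMatch_not_of_overrun {gen pat : List Int} {j : Nat}
    (hm : pat.length ≠ 0) (hb : gen.length < j + pat.length) : ¬ pvMatch gen pat j := by
  intro h'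
  have := congrArg List.length h'
  simp only [List.length_take, List.length_drop] at this
  omega

theorem pvMatch_le {gen pat : List Int} {j : Nat}
    (hm : pat.length ≠ 0) (h : pvMatch gen pat j) : j + pat.length ≤ gen.length := by
  by_contra hb
  exact pvMatch_not_of_overrun hm (by omega) h

theorem slice_eq_pvMatch (gen pat : List Int) (j : Nat) :
    (PySem.List.slice gen (some (j : Int)) (some ((j : Int) + (pat.length : Int))) = pat) ↔ pvMatch gen pat j := by
  rw [PySem.List.slice_natCast_add]
  exact Iff.rfl

theorem ffsInner_fixed (gen : List Int) (n i : Nat) (ss : List (List Int)) (m0 : Int) :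
    ffsInner gen n i ss (some ((i : Int), m0)) = some ((i : Int), m0) := by
  induction ss with
  | nil => rfl
  | cons pat rest ih =>
    unfold ffsInner
    split_ifs with h1 h2 h3 <;> first
      | exact ih
      | (exfalso; simp at h3)

theorem ffsInner_none_of_nohit {gen : List Int} {i : Nat} {ss : List (List Int)}
    (h : ¬ pvHit gen ss i) : ffsInner gen gen.length i ss none = none := by
  induction ss with
  | nil => rfl
  | cons pat rest ih =>
    rw [pvHit_cons] at h
    push_neg at h
    obtain ⟨h1, h2⟩ := h
    unfold ffsInner
    have htail := ih h2
    split_ifs with hg hsl hall <;> try exact htail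
    · exfalso
      push_neg at hg
      rw [slice_eq_pvMatch] at hsl
      exact (h1 hg.1) hsl

theorem ffsInner_some_of_hit {gen : List Int} {i : Nat} {ss : List (List Int)}
    (h : pvHit gen ss i) : ∃ m0, ffsInner gen gen.length i ss none = some ((i : Int), m0) := by
  induction ss with
  | nil => simp [pvHit] at h
  | cons pat rest ih =>
    rw [pvHit_cons] at h
    unfold ffsInner
    split_ifs with hg hsl hall
    · -- the guard skips pat, so the hit is in rest
      have hpf : ¬ (pat.length ≠ 0 ∧ pvMatch gen pat i) := by
        rcases hg with hg | hg
        · rintro ⟨hm, _⟩; omega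
        · rintro ⟨hm, hmt⟩
          exact pvMatch_not_of_overrun hm (by omega) hmt
      rcases h with h | h
      · exact absurd h hpf
      · exact ih h
    · exact ⟨(pat.length : Int), ffsInner_fixed gen gen.length i rest (pat.length : Int)⟩
    · simp at hall
    · push_neg at hg
      rw [slice_eq_pvMatch] at hsl
      rcases h with h | h
      · exact absurd h.2 hsl
      · exact ih h

theorem ffsLoop_none_iff (gen : List Int) (ss : List (List Int)) :
    ∀ i, ffsLoop gen ss gen.length i none = none ↔
      (∀ j, i ≤ j → j < gen.length → ¬ pvHit gen ss j) := by
  intro i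
  induction hk : gen.length - i using Nat.strong_induction_on generalizing i with
  | _ k ih =>
    unfold ffsLoop
    by_cases hi : i < gen.length
    · rw [dif_pos hi]
      by_cases hh : pvHit gen ss i
      · obtain ⟨m0, hm0⟩ := ffsInner_some_of_hit hh
        rw [hm0]
        simp only [↓reduceIte]
        constructor
        · intro h; exact absurd h (by simp)
        · intro h
          exact absurd hh (h i le_rfl hi)
      · rw [ffsInner_none_of_nohit hh]
        rw [ih (gen.length - (i+1)) (by omega) (i+1) rfl]
        constructor
        · intro h j hij hjn
          rcases Nat.eq_or_lt_of_le hij with rfl | hlt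
          · exact hh
          · exact h j hlt hjn
        · intro h j hij hjn
          exact h j (by omega) hjn
    · rw [dif_neg hi]
      constructor
      · intro _ j hij hjn
        omega
      · intro _; rfl

theorem ffsLoop_some (gen : List Int) (ss : List (List Int)) :
    ∀ i b, ffsLoop gen ss gen.length i none = some b →
      ∃ j, i ≤ j ∧ j < gen.length ∧ pvHit gen ss j ∧
        (∀ k, i ≤ k → k < j → ¬ pvHit gen ss k) ∧ b.1 = (j : Int) := by
  intro i
  induction hk : gen.length - i using Nat.strong_induction_on generalizing i with
  | _ k ih =>
    intro b hb
    unfold ffsLoop at hb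
    by_cases hi : i < gen.length
    · rw [dif_pos hi] at hb
      by_cases hh : pvHit gen ss i
      · obtain ⟨m0, hm0⟩ := ffsInner_some_of_hit hh
        rw [hm0] at hb
        simp only [↓reduceIte] at hb
        refine ⟨i, le_rfl, hi, hh, fun k h1 h2 => by omega, ?_⟩
        cases hb; rfl
      · rw [ffsInner_none_of_nohit hh] at hb
        obtain ⟨j, hij, hjn, hhit, hmin, hfst⟩ :=
          ih (gen.length - (i+1)) (by omega) (i+1) rfl b hb
        refine ⟨j, by omega, hjn, hhit, ?_, hfst⟩
        intro k h1 h2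
        rcases Nat.eq_or_lt_of_le h1 with rfl | hlt
        · exact hh
        · exact hmin k hlt h2
    · rw [dif_neg hi] at hb
      exact absurd hb (by simp)

theorem firstOccAux_none_iff (hay pat : List Int) (hm : pat.length ≠ 0) :
    ∀ i, firstOccAux hay pat i = none ↔ (∀ j, i ≤ j → ¬ pvMatch hay pat j) := by
  intro i
  induction hk : hay.length + 1 - i using Nat.strong_induction_on generalizing i with
  | _ k ih =>
    unfold firstOccAux
    by_cases hi : i + pat.length ≤ hay.length
    · rw [dif_pos hi]
      by_cases hmt : (hay.drop i).take pat.length = pat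
      · rw [if_pos hmt]
        constructor
        · intro h; exact absurd h (by simp)
        · intro h
          exact absurd hmt (h i le_rfl)
      · rw [if_neg hmt]
        rw [ih (hay.length + 1 - (i+1)) (by omega) (i+1) rfl]
        constructor
        · intro h j hij
          rcases Nat.eq_or_lt_of_le hij with rfl | hlt
          · exact hmt
          · exact h j hlt
        · intro h j hij
          exact h j (by omega)
    · rw [dif_neg hi]
      constructor
      · intro _ j hij
        exact pvMatch_not_of_overrun hm (by omega)
      · intro _; rfl

theorem firstOccAux_some (hay pat : List Int) (_hm : pat.length ≠ 0) :
    ∀ i x, firstOccAux hay pat i = some x →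
      ∃ j, i ≤ j ∧ pvMatch hay pat j ∧
        (∀ k, i ≤ k → k < j → ¬ pvMatch hay pat k) ∧ x = (j : Int) := by
  intro i
  induction hk : hay.length + 1 - i using Nat.strong_induction_on generalizing i with
  | _ k ih =>
    intro x hx
    unfold firstOccAux at hx
    by_cases hi : i + pat.length ≤ hay.length
    · rw [dif_pos hi] at hx
      by_cases hmt : (hay.drop i).take pat.length = pat
      · rw [if_pos hmt] at hx
        refine ⟨i, le_rfl, hmt, fun k h1 h2 => by omega, ?_⟩
        cases hx; rfl
      · rw [if_neg hmt] at hx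
        obtain ⟨j, hij, hmatch, hmin, hxe⟩ :=
          ih (hay.length + 1 - (i+1)) (by omega) (i+1) rfl x hx
        refine ⟨j, by omega, hmatch, ?_, hxe⟩
        intro k h1 h2
        rcases Nat.eq_or_lt_of_le h1 with rfl | hlt
        · exact hmt
        · exact hmin k hlt h2
    · rw [dif_neg hi] at hx
      exact absurd hx (by simp)

-- the central fact: A's earliest-hit index equals B's min of per-pattern first occurrences
theorem main_eq (gen : List Int) (ss : List (List Int)) :
    (find_first_stop gen ss).map Prod.fst =
      PySem.List.min? (ss.filterMap (fun pat => firstOcc gen pat)) (fun x => x) := by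
  unfold find_first_stop
  cases ho : ffsLoop gen ss gen.length 0 none with
  | none =>
    have hall := (ffsLoop_none_iff gen ss 0).mp ho
    have hnil : ss.filterMap (fun pat => firstOcc gen pat) = [] := by
      rw [List.filterMap_eq_nil_iff]
      intro pat hpat
      unfold firstOcc
      by_cases hm : pat.length = 0
      · rw [if_pos hm]
      · rw [if_neg hm]
        rw [firstOccAux_none_iff gen pat hm 0]
        intro j _ hmt
        have hjn : j < gen.length := by
          have := pvMatch_le hm hmt
          omega
        exact hall j (by omega) hjn ⟨pat, hpat, hm, hmt⟩
    rw [hnil]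
    simp [PySem.List.min?]
  | some b =>
    obtain ⟨j, _, hjn, hhit, hmin, hfst⟩ := ffsLoop_some gen ss 0 b ho
    -- (j : Int) is in the filterMap list
    have hjmem : (j : Int) ∈ ss.filterMap (fun pat => firstOcc gen pat) := by
      obtain ⟨pat, hpat, hm, hmt⟩ := hhit
      rw [List.mem_filterMap]
      refine ⟨pat, hpat, ?_⟩
      unfold firstOcc
      rw [if_neg hm]
      cases hocc : firstOccAux gen pat 0 with
      | none =>
        rw [firstOccAux_none_iff gen pat hm 0] at hocc
        exact absurd hmt (hocc j (by omega))
      | some x =>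
        obtain ⟨j', _, hmatch', hmin', hxe⟩ := firstOccAux_some gen pat hm 0 x hocc
        have hj'n : j' < gen.length := by
          have := pvMatch_le hm hmatch'
          omega
        have h1 : j' ≤ j := by
          by_contra hlt
          push_neg at hlt
          exact hmin' j (by omega) hlt hmt
        have h2 : j ≤ j' := by
          by_contra hlt
          push_neg at hlt
          exact hmin j' (by omega) hlt ⟨pat, hpat, hm, hmatch'⟩
        have : j' = j := by omega
        rw [hxe, this]
    -- every element of the filterMap list is ≥ j
    have hge : ∀ x ∈ ss.filterMap (fun pat => firstOcc gen pat), (j : Int) ≤ x := by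
      intro x hx
      rw [List.mem_filterMap] at hx
      obtain ⟨pat, hpat, hocc⟩ := hx
      unfold firstOcc at hocc
      by_cases hm : pat.length = 0
      · rw [if_pos hm] at hocc; exact absurd hocc (by simp)
      · rw [if_neg hm] at hocc
        obtain ⟨j'', _, hmatch'', _, hxe⟩ := firstOccAux_some gen pat hm 0 x hocc
        have : j ≤ j'' := by
          by_contra hlt
          have h2 : j'' < gen.length := by
            have := pvMatch_le hm hmatch''
            omega
          exact hmin j'' (by omega) (by omega) ⟨pat, hpat, hm, hmatch''⟩
        rw [hxe]
        exact_mod_cast this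
    cases hmq : PySem.List.min? (ss.filterMap (fun pat => firstOcc gen pat)) (fun x => x) with
    | none =>
      rw [PySem.List.min?_eq_none_iff] at hmq
      rw [hmq] at hjmem
      simp at hjmem
    | some v =>
      have hv1 : v ∈ ss.filterMap (fun pat => firstOcc gen pat) := PySem.List.min?_mem hmq
      have hv2 : v ≤ (j : Int) := PySem.List.min?_isMin hmq _ hjmem
      have hv3 : (j : Int) ≤ v := hge v hv1
      have : v = (j : Int) := le_antisymm hv2 hv3
      simp [this, hfst]

theorem scan_eq (input_len : Int) (stop_seqs : List (List Int)) :
    ∀ t steps, aScan input_len stop_seqs t steps = bScan input_len stop_seqs t steps := by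
  intro t steps
  induction steps generalizing t with
  | nil => rfl
  | cons ids rest ih =>
    unfold aScan bScan
    simp only []
    have h := main_eq (PySem.List.slice ids (some input_len) none) stop_seqs
    cases hf : find_first_stop (PySem.List.slice ids (some input_len) none) stop_seqs with
    | none =>
      rw [hf] at h
      simp only [Option.map_none] at h
      rw [← h]
      exact ih (t + 1)
    | some hit =>
      rw [hf] at h
      simp only [Option.map_some] at h
      rw [← h]

-- ===== VERDICT (by name: the statement is the Claim_ definition above) =====
theorem apply_early_stop_from_history_spec : Claim_equal_apply_early_stop_from_history := by
  intro step_seqs input_len stop_seqs max_new_tokens _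
  unfold Spec_apply_early_stop_from_history
  unfold apply_early_stop_from_history apply_early_stop_from_history_alt
  cases step_seqs with
  | nil => rfl
  | cons s rest =>
    simp only [List.length_cons, Nat.succ_ne_zero, if_false]
    rw [scan_eq]
    cases hs : bScan input_len stop_seqs 0 (s :: rest) with
    | none => simp
    | some tc =>
      simp only []
      have : ((tc.1 : Int) + 1) = (((tc.1 + 1 : Nat)) : Int) := by push_cast; ring
      rw [this, PySem.List.slice_to_natCast]
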